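-- pv_equiv track=rewrite | github.com/jackfitton112/Micromouse | Route tracer/functions.py | makepath
-- ===== SOURCE A (Python) =====
-- def convert(list):
--     direction = ["N","E","S","W"]
--     directionlistpos = 2
--
--     x, y = (10, 10)
--     startpos = (x, y)
--     pathlist = []
--     i = 0
--
--     while i < len(list):
--
--         if "F" in list[i]:
--             if directionlistpos > 3:
--                 directionlistpos = directionlistpos % 4
--             for j in range(int(list[i][:-1])):
--                 pathlist.append(direction[directionlistpos])
--
--         else:
--             if list[i] == "L":
--                 directionlistpos -= 1
--             else:
--                 directionlistpos += 1
--
--         i += 1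
--     return pathlist
--
-- def makepath(list):
--     pathlist = convert(list)
--
--
--     startpos = (10, 10)
--     x, y = startpos
--     finallist = [(startpos)]
--
--     i = 0
--
--     while i < len(pathlist):
--
--         if pathlist[i] == "N":
--             y -= 10
--             finallist.append((x,y))
--
--         elif pathlist[i] == "E":
--             x -= 10
--             finallist.append((x,y))
--
--         elif pathlist[i] == "S":
--             y += 10
--             finallist.append((x,y))
--
--         else:
--             x += 10
--             finallist.append((x,y))
--
--         i += 1
--     return finallist
-- ===== SOURCE B (Python) =====
-- def makepath(list):
--     # One-pass walk: no intermediate letter list; a delta table indexed by pos % 4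
--     # replaces building and re-scanning the per-step direction letters.
--     deltas = [(0, -10), (-10, 0), (0, 10), (10, 0)]  # N, E, S, W
--     x, y = 10, 10
--     pos = 2
--     out = [(x, y)]
--     for cmd in list:
--         if "F" in cmd:
--             dx, dy = deltas[pos % 4]
--             for _ in range(int(cmd[:-1])):
--                 x += dx
--                 y += dy
--                 out.append((x, y))
--         elif cmd == "L":
--             pos -= 1
--         else:
--             pos += 1
--     return out
-- ===== Notes on version B (the rewrite author's own statement) =====
-- stated objective: simpler
-- what changed: B removes A's intermediate direction-letter list and second scan: a single pass over the commands keeps (x, y, pos) and appends positions directly, using a delta table indexed by pos % 4 instead of convert()'s letter list plus makepath()'s if-chain.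
-- outside the precondition, e.g. on makepath(['xF']): A raises ValueError, B raises ValueError; on makepath(['L', 'L', 'L', 'L', 'L', 'L', 'L', '1F']): A raises IndexError, B returns [(10, 10), (20, 10)]
import Mathlib
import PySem

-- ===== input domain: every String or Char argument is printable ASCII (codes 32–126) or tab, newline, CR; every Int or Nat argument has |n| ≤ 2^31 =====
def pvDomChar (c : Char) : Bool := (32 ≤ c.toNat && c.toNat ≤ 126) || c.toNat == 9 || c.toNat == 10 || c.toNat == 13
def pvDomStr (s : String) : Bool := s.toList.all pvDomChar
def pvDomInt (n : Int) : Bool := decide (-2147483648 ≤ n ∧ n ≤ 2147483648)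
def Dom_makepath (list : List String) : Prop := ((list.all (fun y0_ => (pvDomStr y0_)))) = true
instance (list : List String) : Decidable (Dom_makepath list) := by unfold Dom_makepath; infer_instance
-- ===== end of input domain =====

-- B replaces A's two-pass convert-to-letters-then-walk by a single pass over the
-- commands with a delta table indexed by pos % 4 (objective: simpler).


-- ===== PORT A =====
def pvDirection : List String := ["N", "E", "S", "W"]

-- one iteration of convert's while loop; state = (directionlistpos, pathlist)
def pvConvStep (st : Int × List String) (s : String) : Int × List String :=
  if PySem.Str.isIn "F" s then
    let d := if st.1 > 3 then PySem.Int.mod st.1 4 else st.1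
    let n := (PySem.Int.ofStr? (PySem.Str.slice s none (some (-1)))).getD 0
    (d, (PySem.List.pyRange 0 n 1).foldl
      (fun pl _ => pl ++ [(PySem.List.pyGet? pvDirection d).getD ""]) st.2)
  else if s == "L" then (st.1 - 1, st.2)
  else (st.1 + 1, st.2)

def pvConvert (list : List String) : List String := (list.foldl pvConvStep (2, [])).2

-- one iteration of makepath's while loop; state = ((x, y), finallist)
def pvWalkStep (st : (Int × Int) × List (Int × Int)) (p : String) :
    (Int × Int) × List (Int × Int) :=
  if p == "N" then ((st.1.1, st.1.2 - 10), st.2 ++ [(st.1.1, st.1.2 - 10)])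
  else if p == "E" then ((st.1.1 - 10, st.1.2), st.2 ++ [(st.1.1 - 10, st.1.2)])
  else if p == "S" then ((st.1.1, st.1.2 + 10), st.2 ++ [(st.1.1, st.1.2 + 10)])
  else ((st.1.1 + 10, st.1.2), st.2 ++ [(st.1.1 + 10, st.1.2)])

def makepath (list : List String) : List (Int × Int) :=
  ((pvConvert list).foldl pvWalkStep ((10, 10), [(10, 10)])).2

-- ===== PORT B =====
def pvDeltas : List (Int × Int) := [(0, -10), (-10, 0), (0, 10), (10, 0)]

-- one iteration of B's single loop; state = (pos, ((x, y), out))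
def pvAltStep (st : Int × ((Int × Int) × List (Int × Int))) (cmd : String) :
    Int × ((Int × Int) × List (Int × Int)) :=
  if PySem.Str.isIn "F" cmd then
    let dxy := (PySem.List.pyGet? pvDeltas (PySem.Int.mod st.1 4)).getD (0, 0)
    let n := (PySem.Int.ofStr? (PySem.Str.slice cmd none (some (-1)))).getD 0
    (st.1, (PySem.List.pyRange 0 n 1).foldl
      (fun p _ => ((p.1.1 + dxy.1, p.1.2 + dxy.2), p.2 ++ [(p.1.1 + dxy.1, p.1.2 + dxy.2)])) st.2)
  else if cmd == "L" then (st.1 - 1, st.2)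
  else (st.1 + 1, st.2)

def makepath_alt (list : List String) : List (Int × Int) :=
  (list.foldl pvAltStep (2, ((10, 10), [(10, 10)]))).2.2

-- ===== PRECONDITION & SPEC =====
-- Pre_ excludes exactly the inputs on which Python A raises: an 'F' command whose
-- prefix int(...) fails (ValueError), or a forward with at least one step taken while
-- directionlistpos has drifted below -4 (IndexError on direction[directionlistpos]).
def pvPreStep (st : Option Int) (s : String) : Option Int :=
  match st with
  | none => none
  | some d =>
    if PySem.Str.isIn "F" s then
      let d' := if d > 3 then PySem.Int.mod d 4 else d
      match PySem.Int.ofStr? (PySem.Str.slice s none (some (-1))) with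
      | none => none
      | some n => if n ≤ 0 ∨ -4 ≤ d' then some d' else none
    else some (if s == "L" then d - 1 else d + 1)

def Pre_makepath (list : List String) : Prop :=
  (list.foldl pvPreStep (some 2)).isSome = true
instance (list : List String) : Decidable (Pre_makepath list) := by
  unfold Pre_makepath; infer_instance

def pvWitness_makepath : List String := ["2F", "L", "1F", "R", "3F"]

def Spec_makepath (list : List String) (out : List (Int × Int)) : Prop := out = makepath_alt list
instance (list : List String) (out : List (Int × Int)) : Decidable (Spec_makepath list out) := by unfold Spec_makepath; infer_instance

-- ===== CLAIM (what is proved, stated in full; the proofs are below) =====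
def Claim_equal_makepath : Prop := ∀ (list : List String), Dom_makepath list → Pre_makepath list → Spec_makepath list (makepath list)

-- ===== LEMMAS AND PROOFS =====

theorem pvPre_none (list : List String) : list.foldl pvPreStep none = none := by
  induction list with
  | nil => rfl
  | cons s rest ih => simpa [pvPreStep] using ih

-- evaluation lemmas for the three step functions on each branch shape
theorem pvConvStep_F (d : Int) (pl : List String) (s : String)
    (hF : PySem.Str.isIn "F" s = true) :
    pvConvStep (d, pl) s = (if d > 3 then PySem.Int.mod d 4 else d,
      pl ++ (PySem.List.pyRange 0
          ((PySem.Int.ofStr? (PySem.Str.slice s none (some (-1)))).getD 0) 1).map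
        (fun _ => (PySem.List.pyGet? pvDirection
          (if d > 3 then PySem.Int.mod d 4 else d)).getD "")) := by
  unfold pvConvStep
  dsimp only
  rw [if_pos hF]
  rw [PySem.List.foldl_append_singleton_eq_map]

theorem pvConvStep_turn (d : Int) (pl : List String) (s : String)
    (hF : PySem.Str.isIn "F" s = false) :
    pvConvStep (d, pl) s = (if s == "L" then d - 1 else d + 1, pl) := by
  unfold pvConvStep
  dsimp only
  rw [hF]
  by_cases hL : (s == "L") = true
  · rw [if_neg (by simp), if_pos hL, if_pos hL]
  · rw [if_neg (by simp), if_neg hL, if_neg hL]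

theorem pvAltStep_F (ppos : Int) (st : (Int × Int) × List (Int × Int)) (s : String)
    (hF : PySem.Str.isIn "F" s = true) :
    pvAltStep (ppos, st) s = (ppos, (PySem.List.pyRange 0
        ((PySem.Int.ofStr? (PySem.Str.slice s none (some (-1)))).getD 0) 1).foldl
      (fun q _ => ((q.1.1 + ((PySem.List.pyGet? pvDeltas (PySem.Int.mod ppos 4)).getD (0,0)).1,
                    q.1.2 + ((PySem.List.pyGet? pvDeltas (PySem.Int.mod ppos 4)).getD (0,0)).2),
                   q.2 ++ [(q.1.1 + ((PySem.List.pyGet? pvDeltas (PySem.Int.mod ppos 4)).getD (0,0)).1,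
                            q.1.2 + ((PySem.List.pyGet? pvDeltas (PySem.Int.mod ppos 4)).getD (0,0)).2)])) st) := by
  unfold pvAltStep
  dsimp only
  rw [if_pos hF]

theorem pvAltStep_turn (ppos : Int) (st : (Int × Int) × List (Int × Int)) (s : String)
    (hF : PySem.Str.isIn "F" s = false) :
    pvAltStep (ppos, st) s = (if s == "L" then ppos - 1 else ppos + 1, st) := by
  unfold pvAltStep
  dsimp only
  rw [hF]
  by_cases hL : (s == "L") = true
  · rw [if_neg (by simp), if_pos hL, if_pos hL]
  · rw [if_neg (by simp), if_neg hL, if_neg hL]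

theorem pvPreStep_F (d : Int) (s : String) (n : Int)
    (hF : PySem.Str.isIn "F" s = true)
    (hn : PySem.Int.ofStr? (PySem.Str.slice s none (some (-1))) = some n) :
    pvPreStep (some d) s =
      (if n ≤ 0 ∨ -4 ≤ (if d > 3 then PySem.Int.mod d 4 else d)
       then some (if d > 3 then PySem.Int.mod d 4 else d) else none) := by
  unfold pvPreStep
  dsimp only
  rw [if_pos hF, hn]

theorem pvPreStep_F_none (d : Int) (s : String)
    (hF : PySem.Str.isIn "F" s = true)
    (hn : PySem.Int.ofStr? (PySem.Str.slice s none (some (-1))) = none) :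
    pvPreStep (some d) s = none := by
  unfold pvPreStep
  dsimp only
  rw [if_pos hF, hn]

theorem pvPreStep_turn (d : Int) (s : String)
    (hF : PySem.Str.isIn "F" s = false) :
    pvPreStep (some d) s = some (if s == "L" then d - 1 else d + 1) := by
  unfold pvPreStep
  dsimp only
  rw [hF]
  rw [if_neg (by simp)]

-- one step of convert, with the accumulator pulled out
theorem pvConvStep_acc (d : Int) (pl : List String) (s : String) :
    pvConvStep (d, pl) s = ((pvConvStep (d, []) s).1, pl ++ (pvConvStep (d, []) s).2) := by
  cases hF : PySem.Str.isIn "F" s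
  · rw [pvConvStep_turn d pl s hF, pvConvStep_turn d [] s hF]
    simp
  · rw [pvConvStep_F d pl s hF, pvConvStep_F d [] s hF]
    simp

-- the accumulator of convert's fold only grows by appending on the right
theorem pvConv_acc (list : List String) : ∀ (d : Int) (pl : List String),
    list.foldl pvConvStep (d, pl) =
      ((list.foldl pvConvStep (d, []) ).1, pl ++ (list.foldl pvConvStep (d, []) ).2) := by
  induction list with
  | nil => intro d pl; simp
  | cons s rest ih =>
    intro d pl
    rw [List.foldl_cons, List.foldl_cons, pvConvStep_acc d pl s,
        show pvConvStep (d, []) s = ((pvConvStep (d, []) s).1, (pvConvStep (d, []) s).2) from rfl,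
        ih (pvConvStep (d, []) s).1 (pl ++ (pvConvStep (d, []) s).2),
        ih (pvConvStep (d, []) s).1 (pvConvStep (d, []) s).2]
    simp

-- walking a block of identical letters = B's inner forward loop, given one-step agreement
theorem pvFold_walk_eq (c : String) (dxy : Int × Int)
    (h : ∀ st : (Int × Int) × List (Int × Int),
      pvWalkStep st c = ((st.1.1 + dxy.1, st.1.2 + dxy.2), st.2 ++ [(st.1.1 + dxy.1, st.1.2 + dxy.2)])) :
    ∀ (l : List Int) (st : (Int × Int) × List (Int × Int)),
      (l.map (fun _ => c)).foldl pvWalkStep st =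
        l.foldl (fun p _ => ((p.1.1 + dxy.1, p.1.2 + dxy.2), p.2 ++ [(p.1.1 + dxy.1, p.1.2 + dxy.2)])) st := by
  intro l
  induction l with
  | nil => intro st; rfl
  | cons a t ih => intro st; simp only [List.map_cons, List.foldl_cons, h, ih]

-- the main invariant: A's letters-so-far, walked from any state, equal B's state,
-- provided the two direction counters agree mod 4 and no step of A raises
theorem pvMain (list : List String) : ∀ (d p : Int) (st : (Int × Int) × List (Int × Int)),
    PySem.Int.mod d 4 = PySem.Int.mod p 4 →
    (list.foldl pvPreStep (some d)).isSome = true →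
    ((list.foldl pvConvStep (d, [])).2).foldl pvWalkStep st =
      (list.foldl pvAltStep (p, st)).2 := by
  induction list with
  | nil => intro d p st _ _; rfl
  | cons s rest ih =>
    intro d p st hmod hpre
    simp only [List.foldl_cons] at hpre ⊢
    have hmod4 : ∀ a : Int, PySem.Int.mod a 4 = a % 4 :=
      fun a => PySem.Int.mod_eq_emod_of_pos (by omega)
    cases hF : PySem.Str.isIn "F" s with
    | false =>
      -- turn command
      rw [pvPreStep_turn d s hF] at hpre
      rw [pvConvStep_turn d [] s hF, pvAltStep_turn p st s hF]
      by_cases hL : (s == "L") = true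
      · rw [if_pos hL] at hpre ⊢
        rw [if_pos hL]
        refine ih (d - 1) (p - 1) st ?_ hpre
        simp only [hmod4] at hmod ⊢; omega
      · rw [if_neg hL] at hpre ⊢
        rw [if_neg hL]
        refine ih (d + 1) (p + 1) st ?_ hpre
        simp only [hmod4] at hmod ⊢; omega
    | true =>
      -- forward command
      obtain ⟨d', hd'⟩ : ∃ d', (if d > 3 then PySem.Int.mod d 4 else d) = d' := ⟨_, rfl⟩
      have hd'mod : PySem.Int.mod d' 4 = PySem.Int.mod d 4 := by
        rw [← hd']; split_ifs with h
        · simp only [hmod4]; omega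
        · rfl
      rcases hn : PySem.Int.ofStr? (PySem.Str.slice s none (some (-1))) with _ | n
      · rw [pvPreStep_F_none d s hF hn, pvPre_none] at hpre
        simp at hpre
      · rw [pvPreStep_F d s n hF hn, hd'] at hpre
        have hcond : (n ≤ 0 ∨ -4 ≤ d') ∧ (rest.foldl pvPreStep (some d')).isSome = true := by
          by_cases hc : n ≤ 0 ∨ -4 ≤ d'
          · rw [if_pos hc] at hpre; exact ⟨hc, hpre⟩
          · rw [if_neg hc, pvPre_none] at hpre; simp at hpre
        rw [pvConvStep_F d [] s hF, pvAltStep_F p st s hF, hd', hn]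
        rw [pvConv_acc rest d' _]
        simp only [List.foldl_append, List.nil_append, Option.getD_some]
        have hblock : ((PySem.List.pyRange 0 n 1).map
              (fun _ => (PySem.List.pyGet? pvDirection d').getD "")).foldl pvWalkStep st =
            (PySem.List.pyRange 0 n 1).foldl
              (fun q _ => ((q.1.1 + ((PySem.List.pyGet? pvDeltas (PySem.Int.mod p 4)).getD (0,0)).1,
                            q.1.2 + ((PySem.List.pyGet? pvDeltas (PySem.Int.mod p 4)).getD (0,0)).2),
                           q.2 ++ [(q.1.1 + ((PySem.List.pyGet? pvDeltas (PySem.Int.mod p 4)).getD (0,0)).1,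
                                    q.1.2 + ((PySem.List.pyGet? pvDeltas (PySem.Int.mod p 4)).getD (0,0)).2)])) st := by
          rcases hcond.1 with hn0 | hrange
          · rw [PySem.List.pyRange_one_eq_nil (by omega)]; rfl
          · have hle3 : d' ≤ 3 := by
              rw [← hd']; split_ifs with h
              · have := PySem.Int.mod_lt d (b := 4) (by omega); omega
              · omega
            have hpm : PySem.Int.mod p 4 = PySem.Int.mod d' 4 := by rw [hd'mod, hmod]
            rw [hpm]
            clear hd' hd'mod hmod hpm hcond hpre hn
            interval_cases d'
            · rw [show (PySem.List.pyGet? pvDirection (-4)).getD "" = "N" from rfl,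
                 show (PySem.List.pyGet? pvDeltas (PySem.Int.mod (-4) 4)).getD (0,0) = ((0:Int), (-10:Int)) from rfl]
              exact pvFold_walk_eq _ _ (fun st => by simp [pvWalkStep, sub_eq_add_neg]) _ _
            · rw [show (PySem.List.pyGet? pvDirection (-3)).getD "" = "E" from rfl,
                 show (PySem.List.pyGet? pvDeltas (PySem.Int.mod (-3) 4)).getD (0,0) = ((-10:Int), (0:Int)) from rfl]
              exact pvFold_walk_eq _ _ (fun st => by simp [pvWalkStep, sub_eq_add_neg]) _ _
            · rw [show (PySem.List.pyGet? pvDirection (-2)).getD "" = "S" from rfl,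
                 show (PySem.List.pyGet? pvDeltas (PySem.Int.mod (-2) 4)).getD (0,0) = ((0:Int), (10:Int)) from rfl]
              exact pvFold_walk_eq _ _ (fun st => by simp [pvWalkStep]) _ _
            · rw [show (PySem.List.pyGet? pvDirection (-1)).getD "" = "W" from rfl,
                 show (PySem.List.pyGet? pvDeltas (PySem.Int.mod (-1) 4)).getD (0,0) = ((10:Int), (0:Int)) from rfl]
              exact pvFold_walk_eq _ _ (fun st => by simp [pvWalkStep]) _ _
            · rw [show (PySem.List.pyGet? pvDirection 0).getD "" = "N" from rfl,
                 show (PySem.List.pyGet? pvDeltas (PySem.Int.mod 0 4)).getD (0,0) = ((0:Int), (-10:Int)) from rfl]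
              exact pvFold_walk_eq _ _ (fun st => by simp [pvWalkStep, sub_eq_add_neg]) _ _
            · rw [show (PySem.List.pyGet? pvDirection 1).getD "" = "E" from rfl,
                 show (PySem.List.pyGet? pvDeltas (PySem.Int.mod 1 4)).getD (0,0) = ((-10:Int), (0:Int)) from rfl]
              exact pvFold_walk_eq _ _ (fun st => by simp [pvWalkStep, sub_eq_add_neg]) _ _
            · rw [show (PySem.List.pyGet? pvDirection 2).getD "" = "S" from rfl,
                 show (PySem.List.pyGet? pvDeltas (PySem.Int.mod 2 4)).getD (0,0) = ((0:Int), (10:Int)) from rfl]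
              exact pvFold_walk_eq _ _ (fun st => by simp [pvWalkStep]) _ _
            · rw [show (PySem.List.pyGet? pvDirection 3).getD "" = "W" from rfl,
                 show (PySem.List.pyGet? pvDeltas (PySem.Int.mod 3 4)).getD (0,0) = ((10:Int), (0:Int)) from rfl]
              exact pvFold_walk_eq _ _ (fun st => by simp [pvWalkStep]) _ _
        rw [hblock]
        exact ih d' p _ (by rw [hd'mod, hmod]) hcond.2

-- ===== VERDICT (by name: the statement is the Claim_ definition above) =====
theorem makepath_spec : Claim_equal_makepath := by
  intro list _ hpre
  unfold Spec_makepath makepath makepath_alt pvConvert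
  exact congrArg Prod.snd (pvMain list 2 2 ((10, 10), [(10, 10)]) rfl hpre)
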